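-- pv_equiv track=rewrite | github.com/canolmezoglu/DyNetiKAT | src/python/lts_create.py | get_curr_programs
-- ===== SOURCE A (Python) =====
-- def get_curr_programs(name, grr):
--     name = name.split(",")[0]
--     programs = name.split("||")
--     programs = [x.strip() for x in programs]
--     final_programs = list()
--     for program in programs:
--         # eger recursive bisi okuyosam
--         if program.startswith("@Recursive("):
--             # programin ismini aliyorum
--             program_name = program.split("@Recursive(")[1]
--             program_name = program_name.split(")")[0]
--             program_name = program_name.strip()
--             if "||" in grr[program_name]:
--                 unfolded = grr[program_name].split("||")
--                 # nondeterministic choice check -FOTGOTTEN GUARDED RECURAS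
--                 while any([x.startswith("@Recursive(") for x in unfolded]):
--                     new = list()
--                     for i in unfolded:
--                         if i.startswith("@Recursive("):
--                             program_name = i.split("@Recursive(")[1]
--                             program_name = program_name.split(")")[0]
--                             new += grr[program_name].split("||")
--                         else:
--                             new.append(i)
--                     unfolded = new
--                 final_programs += unfolded
--             else:
--                 final_programs.append(grr[program_name])
--         else:
--             final_programs.append(program)
--     return final_programs, programs
-- ===== SOURCE B (Python) =====
-- # B: direct left-to-right recursive expansion of each item, instead of A's repeated
-- # whole-list rebuild passes until no @Recursive item remains.
-- def _expand_item(item, grr):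
--     if not item.startswith("@Recursive("):
--         return [item]
--     key = item.split("@Recursive(")[1].split(")")[0]
--     out = []
--     for part in grr[key].split("||"):
--         out += _expand_item(part, grr)
--     return out
--
--
-- def _chunk(program, grr):
--     if not program.startswith("@Recursive("):
--         return [program]
--     key = program.split("@Recursive(")[1].split(")")[0].strip()
--     body = grr[key]
--     if "||" not in body:
--         return [body]
--     return [y for part in body.split("||") for y in _expand_item(part, grr)]
--
--
-- def get_curr_programs(name, grr):
--     programs = [x.strip() for x in name.split(",")[0].split("||")]
--     return [y for p in programs for y in _chunk(p, grr)], programs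
-- ===== Notes on version B (the rewrite author's own statement) =====
-- stated objective: alternative
-- what changed: A unfolds recursive references by repeatedly rebuilding the whole list in full passes until no @Recursive item remains; B expands each part once by direct left-to-right recursion on the reference structure and concatenates the chunks, with no fixpoint loop and no repeated rescans.
import Mathlib
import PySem

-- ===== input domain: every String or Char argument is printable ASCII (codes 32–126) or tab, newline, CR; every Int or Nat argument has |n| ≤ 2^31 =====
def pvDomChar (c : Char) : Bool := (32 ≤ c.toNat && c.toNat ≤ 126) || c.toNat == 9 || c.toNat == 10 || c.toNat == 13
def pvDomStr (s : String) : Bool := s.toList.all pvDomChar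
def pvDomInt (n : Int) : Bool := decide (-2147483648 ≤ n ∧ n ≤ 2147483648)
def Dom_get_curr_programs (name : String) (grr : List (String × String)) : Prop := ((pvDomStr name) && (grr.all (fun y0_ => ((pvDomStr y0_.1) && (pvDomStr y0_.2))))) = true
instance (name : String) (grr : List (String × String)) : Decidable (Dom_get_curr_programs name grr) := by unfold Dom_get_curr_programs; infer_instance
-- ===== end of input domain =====

-- B expands each ||-part by direct recursion on the @Recursive reference structure instead of
-- A's repeated whole-list rebuild passes (objective: alternative); return value only, nothing mutated.


-- ===== PORT A =====
-- s.split(sep) for the nonempty literal separators used here (split? is none only for sep = "")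
def pvSplit (s sep : String) : List String := (PySem.Str.split? s sep).getD []

-- program.split("@Recursive(")[1].split(")")[0]  (no strip; A strips only at top level)
def pvExtractA (program : String) : String :=
  (pvSplit ((pvSplit program "@Recursive(").getD 1 "") ")").getD 0 ""

-- one pass of A's inner while loop: rebuild the whole list, expanding recursive entries in place
def pvPassA (grr : List (String × String)) (unfolded : List String) : List String :=
  unfolded.foldl (fun new i =>
    if PySem.Str.startswith i "@Recursive(" then
      new ++ pvSplit ((List.lookup (pvExtractA i) grr).getD "") "||"
    else new ++ [i]) []

-- A's 'while any(x.startswith("@Recursive(") for x in unfolded)' loop; the fuel only makes the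
-- port total (the Python diverges exactly on the cyclic tables Pre_ excludes)
def pvWhileA (grr : List (String × String)) : Nat → List String → List String
  | 0, u => u
  | f + 1, u =>
      if u.any (fun x => PySem.Str.startswith x "@Recursive(") then
        pvWhileA grr f (pvPassA grr u)
      else u

-- the body of A's 'for program in programs' loop
def pvStepA (grr : List (String × String)) (final : List String) (program : String) : List String :=
  if PySem.Str.startswith program "@Recursive(" then
    let pn := PySem.Str.strip (pvExtractA program)
    let body := (List.lookup pn grr).getD ""      -- grr[pn]; KeyError is excluded by Pre_
    if PySem.Str.isIn "||" body then
      final ++ pvWhileA grr (grr.length + 2) (pvSplit body "||")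
    else
      final ++ [body]
  else final ++ [program]

def get_curr_programs (name : String) (grr : List (String × String)) : List String × List String :=
  let name1 := (pvSplit name ",").getD 0 ""
  let programs := (pvSplit name1 "||").map PySem.Str.strip
  (programs.foldl (pvStepA grr) [], programs)

-- ===== PORT B =====
def pvExtractB (program : String) : String :=
  (pvSplit ((pvSplit program "@Recursive(").getD 1 "") ")").getD 0 ""

-- B's _expand_item: direct recursion; the fuel bounds the nesting DEPTH and only makes the port
-- total (under Pre_ the depth is at most grr.length + 1, so fuel grr.length + 2 is never exhausted)
def pvExpandItem (grr : List (String × String)) : Nat → String → List String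
  | 0, s => [s]
  | f + 1, s =>
      if PySem.Str.startswith s "@Recursive(" then
        (pvSplit ((List.lookup (pvExtractB s) grr).getD "") "||").flatMap
          (fun part => pvExpandItem grr f part)
      else [s]

-- B's _chunk
def pvChunkB (grr : List (String × String)) (program : String) : List String :=
  if !PySem.Str.startswith program "@Recursive(" then [program]
  else
    let key := PySem.Str.strip (pvExtractB program)
    let body := (List.lookup key grr).getD ""
    if !PySem.Str.isIn "||" body then [body]
    else (pvSplit body "||").flatMap (pvExpandItem grr (grr.length + 2))

def get_curr_programs_alt (name : String) (grr : List (String × String)) : List String × List String :=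
  let programs := (pvSplit ((pvSplit name ",").getD 0 "") "||").map PySem.Str.strip
  (programs.flatMap (pvChunkB grr), programs)

-- ===== PRECONDITION & SPEC =====
-- pvRefName / pvDepthI describe grr's @Recursive REFERENCE GRAPH: pvDepthI grr f s is the nesting
-- depth of the @Recursive references reachable from the item s (some iff every key reached from the item exists
-- in grr and no reference chain is longer than f; a chain longer than grr.length + 1 must repeat a
-- key, i.e. be a cycle, so fuel grr.length + 1 loses nothing).
def pvRefName (s : String) : Option String :=
  if PySem.Str.startswith s "@Recursive(" then some (pvExtractA s) else none

def pvDepthI (grr : List (String × String)) : Nat → String → Option Nat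
  | 0, s => if (pvRefName s).isNone then some 0 else none
  | f + 1, s =>
      match pvRefName s with
      | none => some 0
      | some j =>
          match List.lookup j grr with
          | none => none
          | some body =>
              ((pvSplit body "||").foldr (fun p acc =>
                  match pvDepthI grr f p, acc with
                  | some dp, some d => some (max dp d)
                  | _, _ => none) (some 0)).map (· + 1)
  termination_by structural f _ => f

-- Pre_ excludes exactly the inputs on which the Python A does not return normally: a top-level
-- @Recursive program whose (stripped) key is missing from grr (KeyError), and unfoldings that
-- reach a missing key (KeyError) or a cyclic @Recursive reference chain (A's while loop diverges).
def Pre_get_curr_programs (name : String) (grr : List (String × String)) : Prop :=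
  ∀ p ∈ (pvSplit ((pvSplit name ",").getD 0 "") "||").map PySem.Str.strip,
    PySem.Str.startswith p "@Recursive(" = true →
      (List.lookup (PySem.Str.strip (pvExtractA p)) grr).isSome = true ∧
      (PySem.Str.isIn "||" ((List.lookup (PySem.Str.strip (pvExtractA p)) grr).getD "") = true →
        ∀ part ∈ pvSplit ((List.lookup (PySem.Str.strip (pvExtractA p)) grr).getD "") "||",
          (pvDepthI grr (grr.length + 1) part).isSome = true)

instance (name : String) (grr : List (String × String)) : Decidable (Pre_get_curr_programs name grr) := by
  unfold Pre_get_curr_programs; infer_instance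

def pvWitness_get_curr_programs : String × (List (String × String)) :=
  ("@Recursive(a) || b", [("a", "x||@Recursive(c)"), ("c", "y")])

def Spec_get_curr_programs (name : String) (grr : List (String × String)) (out : List String × List String) : Prop := out = get_curr_programs_alt name grr
instance (name : String) (grr : List (String × String)) (out : List String × List String) : Decidable (Spec_get_curr_programs name grr out) := by unfold Spec_get_curr_programs; infer_instance

-- ===== CLAIM (what is proved, stated in full; the proofs are below) =====
def Claim_equal_get_curr_programs : Prop := ∀ (name : String) (grr : List (String × String)), Dom_get_curr_programs name grr → Pre_get_curr_programs name grr → Spec_get_curr_programs name grr (get_curr_programs name grr)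

-- ===== LEMMAS AND PROOFS =====

-- 'the item s unfolds completely within depth f' (proof-side invariant)
def pvOK (grr : List (String × String)) : Nat → String → Prop
  | 0, s => PySem.Str.startswith s "@Recursive(" = false
  | f + 1, s => PySem.Str.startswith s "@Recursive(" = true →
      ∃ body, List.lookup (pvExtractA s) grr = some body ∧
        ∀ p ∈ pvSplit body "||", pvOK grr f p

theorem pvOK_nonrec (grr : List (String × String)) (f : Nat) (s : String)
    (h : PySem.Str.startswith s "@Recursive(" = false) : pvOK grr f s := by
  cases f with
  | zero => exact h
  | succ g => intro hR; rw [h] at hR; cases hR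

theorem pvOK_succ (grr : List (String × String)) : ∀ (f : Nat) (s : String),
    pvOK grr f s → pvOK grr (f + 1) s := by
  intro f
  induction f with
  | zero => intro s h hR; rw [h] at hR; cases hR
  | succ g ih =>
      intro s h hR
      obtain ⟨body, hb, hparts⟩ := h hR
      exact ⟨body, hb, fun p hp => ih p (hparts p hp)⟩

theorem pvOK_mono (grr : List (String × String)) {a b : Nat} (hab : a ≤ b) (s : String)
    (h : pvOK grr a s) : pvOK grr b s := by
  induction hab with
  | refl => exact h
  | step _ ih => exact pvOK_succ grr _ s ih

-- pvRefName s = none is exactly 'the item is not an @Recursive reference'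
theorem pvRefName_none {s : String} (h : pvRefName s = none) :
    PySem.Str.startswith s "@Recursive(" = false := by
  cases hc : PySem.Str.startswith s "@Recursive(" with
  | false => rfl
  | true => rw [pvRefName, if_pos hc] at h; cases h

theorem pvRefName_some {s j : String} (h : pvRefName s = some j) :
    PySem.Str.startswith s "@Recursive(" = true ∧ pvExtractA s = j := by
  cases hc : PySem.Str.startswith s "@Recursive(" with
  | true =>
      rw [pvRefName, if_pos hc, Option.some.injEq] at h
      exact ⟨rfl, h⟩
  | false => rw [pvRefName, if_neg (by rw [hc]; decide)] at h; cases h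

-- the foldr in pvDepthI is the maximum of the member depths
theorem pvDepthFoldr_mem (grr : List (String × String)) (f : Nat) :
    ∀ (l : List String) (m : Nat),
      l.foldr (fun p acc =>
          match pvDepthI grr f p, acc with
          | some dp, some d => some (max dp d)
          | _, _ => none) (some 0) = some m →
      ∀ p ∈ l, ∃ dp, pvDepthI grr f p = some dp ∧ dp ≤ m := by
  intro l
  induction l with
  | nil => intro m _ p hp; cases hp
  | cons q rest ih =>
      intro m h p hp
      rw [List.foldr_cons] at h
      cases hq : pvDepthI grr f q with
      | none => rw [hq] at h; cases h
      | some dq =>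
          rw [hq] at h
          cases hr : rest.foldr (fun p acc =>
              match pvDepthI grr f p, acc with
              | some dp, some d => some (max dp d)
              | _, _ => none) (some 0) with
          | none => rw [hr] at h; cases h
          | some mr =>
              rw [hr] at h
              simp only [Option.some.injEq] at h
              rcases List.mem_cons.mp hp with rfl | hp'
              · exact ⟨dq, hq, by omega⟩
              · obtain ⟨dp, hdp, hle⟩ := ih mr hr p hp'
                exact ⟨dp, hdp, by omega⟩

theorem pvDepthFoldr_le (grr : List (String × String)) (f : Nat)
    (hb : ∀ (p : String) (dp : Nat), pvDepthI grr f p = some dp → dp ≤ f) :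
    ∀ (l : List String) (m : Nat),
      l.foldr (fun p acc =>
          match pvDepthI grr f p, acc with
          | some dp, some d => some (max dp d)
          | _, _ => none) (some 0) = some m → m ≤ f := by
  intro l
  induction l with
  | nil => intro m h; rw [List.foldr_nil, Option.some.injEq] at h; omega
  | cons q rest ih =>
      intro m h
      rw [List.foldr_cons] at h
      cases hq : pvDepthI grr f q with
      | none => rw [hq] at h; cases h
      | some dq =>
          rw [hq] at h
          cases hr : rest.foldr (fun p acc =>
              match pvDepthI grr f p, acc with
              | some dp, some d => some (max dp d)
              | _, _ => none) (some 0) with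
          | none => rw [hr] at h; cases h
          | some mr =>
              rw [hr] at h
              simp only [Option.some.injEq] at h
              have := hb q dq hq
              have := ih mr hr
              omega

theorem pvDepthI_le (grr : List (String × String)) : ∀ (f : Nat) (s : String) (d : Nat),
    pvDepthI grr f s = some d → d ≤ f := by
  intro f
  induction f with
  | zero =>
      intro s d h
      rw [pvDepthI] at h
      by_cases hn : (pvRefName s).isNone
      · rw [if_pos hn, Option.some.injEq] at h; omega
      · rw [if_neg hn] at h; cases h
  | succ g ih =>
      intro s d h
      rw [pvDepthI] at h
      cases hrn : pvRefName s with
      | none => simp only [hrn, Option.some.injEq] at h; omega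
      | some j =>
          simp only [hrn] at h
          cases hlk : List.lookup j grr with
          | none => simp only [hlk] at h; cases h
          | some body =>
              simp only [hlk] at h
              cases hm : (pvSplit body "||").foldr (fun p acc =>
                  match pvDepthI grr g p, acc with
                  | some dp, some d => some (max dp d)
                  | _, _ => none) (some 0) with
              | none => rw [hm, Option.map_none] at h; cases h
              | some m =>
                  rw [hm, Option.map_some, Option.some.injEq] at h
                  have := pvDepthFoldr_le grr g (fun p dp hdp => ih p dp hdp) _ m hm
                  omega

theorem pvDepthI_ok (grr : List (String × String)) : ∀ (f : Nat) (s : String) (d : Nat),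
    pvDepthI grr f s = some d → pvOK grr d s := by
  intro f
  induction f with
  | zero =>
      intro s d h
      rw [pvDepthI] at h
      by_cases hn : (pvRefName s).isNone
      · rw [if_pos hn, Option.some.injEq] at h
        subst h
        exact pvRefName_none (Option.isNone_iff_eq_none.mp hn)
      · rw [if_neg hn] at h; cases h
  | succ g ih =>
      intro s d h
      rw [pvDepthI] at h
      cases hrn : pvRefName s with
      | none =>
          simp only [hrn, Option.some.injEq] at h
          subst h
          exact pvRefName_none hrn
      | some j =>
          simp only [hrn] at h
          cases hlk : List.lookup j grr with
          | none => simp only [hlk] at h; cases h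
          | some body =>
              simp only [hlk] at h
              cases hm : (pvSplit body "||").foldr (fun p acc =>
                  match pvDepthI grr g p, acc with
                  | some dp, some d => some (max dp d)
                  | _, _ => none) (some 0) with
              | none => rw [hm, Option.map_none] at h; cases h
              | some m =>
                  rw [hm, Option.map_some, Option.some.injEq] at h
                  subst h
                  obtain ⟨hR, hj⟩ := pvRefName_some hrn
                  intro _
                  refine ⟨body, hj ▸ hlk, fun p hp => ?_⟩
                  obtain ⟨dp, hdp, hle⟩ := pvDepthFoldr_mem grr g _ m hm p hp
                  exact pvOK_mono grr hle p (ih p dp hdp)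

-- what one in-place expansion of an item yields (the body of A's pass / of B's recursion)
def pvInner (grr : List (String × String)) (i : String) : List String :=
  if PySem.Str.startswith i "@Recursive(" then
    pvSplit ((List.lookup (pvExtractA i) grr).getD "") "||"
  else [i]

theorem pvPassA_eq (grr : List (String × String)) (u : List String) :
    pvPassA grr u = u.flatMap (pvInner grr) := by
  suffices hgen : ∀ (u : List String) (acc : List String),
      u.foldl (fun new i =>
        if PySem.Str.startswith i "@Recursive(" then
          new ++ pvSplit ((List.lookup (pvExtractA i) grr).getD "") "||"
        else new ++ [i]) acc = acc ++ u.flatMap (pvInner grr) by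
    simpa [pvPassA] using hgen u []
  intro u
  induction u with
  | nil => intro acc; simp
  | cons i t ih =>
      intro acc
      simp only [List.foldl_cons, List.flatMap_cons]
      by_cases h : PySem.Str.startswith i "@Recursive(" = true
      · rw [if_pos h, ih]; simp only [pvInner, if_pos h, List.append_assoc]
      · rw [if_neg h, ih]; simp only [pvInner, if_neg h, List.append_assoc]

theorem pvExpandItem_nonrec (grr : List (String × String)) (f : Nat) (s : String)
    (h : PySem.Str.startswith s "@Recursive(" = false) : pvExpandItem grr f s = [s] := by
  cases f with
  | zero => rfl
  | succ g => rw [pvExpandItem, if_neg (by rw [h]; decide)]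

theorem pvExpandItem_succ (grr : List (String × String)) (f : Nat) (s : String) :
    pvExpandItem grr (f + 1) s = (pvInner grr s).flatMap (pvExpandItem grr f) := by
  by_cases h : PySem.Str.startswith s "@Recursive(" = true
  · have hex : pvExtractB = pvExtractA := rfl
    rw [pvExpandItem, if_pos h]
    simp only [pvInner, if_pos h, hex]
  · have h' : PySem.Str.startswith s "@Recursive(" = false := by simpa using h
    rw [pvExpandItem_nonrec grr _ s h']
    simp only [pvInner, if_neg h, List.flatMap_cons, List.flatMap_nil, List.append_nil,
      pvExpandItem_nonrec grr f s h']

theorem pvFlatMapId (l : List String) (g : String → List String)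
    (h : ∀ s ∈ l, g s = [s]) : l.flatMap g = l := by
  induction l with
  | nil => rfl
  | cons a t ih =>
      rw [List.flatMap_cons, h a (List.mem_cons_self ..),
          ih (fun s hs => h s (List.mem_cons_of_mem _ hs))]
      rfl

-- A's while loop computes exactly B's recursive expansion, at any depth bound f covering u
theorem pvWhileA_eq (grr : List (String × String)) : ∀ (f F : Nat) (u : List String),
    (∀ s ∈ u, pvOK grr f s) → f ≤ F →
    pvWhileA grr F u = u.flatMap (pvExpandItem grr f) := by
  intro f
  induction f with
  | zero =>
      intro F u hOK _
      have hall : ∀ s ∈ u, PySem.Str.startswith s "@Recursive(" = false := fun s hs => hOK s hs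
      rw [pvFlatMapId u (pvExpandItem grr 0) (fun s _ => rfl)]
      cases F with
      | zero => rfl
      | succ F' =>
          rw [pvWhileA, if_neg]
          simp only [List.any_eq_true, not_exists, not_and, Bool.not_eq_true]
          intro s hs
          exact hall s hs
  | succ f' ih =>
      intro F u hOK hle
      by_cases hg : u.any (fun x => PySem.Str.startswith x "@Recursive(") = true
      · obtain ⟨F', rfl⟩ : ∃ F', F = F' + 1 := ⟨F - 1, by omega⟩
        rw [pvWhileA, if_pos hg, pvPassA_eq]
        have hOK' : ∀ s' ∈ u.flatMap (pvInner grr), pvOK grr f' s' := by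
          intro s' hs'
          obtain ⟨s, hs, hs'⟩ := List.mem_flatMap.mp hs'
          by_cases hR : PySem.Str.startswith s "@Recursive(" = true
          · obtain ⟨body, hb, hparts⟩ := hOK s hs hR
            rw [pvInner, if_pos hR, hb] at hs'
            exact hparts s' hs'
          · rw [pvInner, if_neg hR] at hs'
            rcases List.mem_singleton.mp hs' with rfl
            exact pvOK_nonrec grr f' s' (by simpa using hR)
        rw [ih F' _ hOK' (by omega)]
        rw [List.flatMap_assoc]
        congr 1
        funext s
        exact (pvExpandItem_succ grr f' s).symm
      · have hall : ∀ s ∈ u, PySem.Str.startswith s "@Recursive(" = false := by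
          intro s hs
          rcases h : PySem.Str.startswith s "@Recursive(" with _ | _
          · rfl
          · exact absurd (List.any_eq_true.mpr ⟨s, hs, h⟩) hg
        rw [pvFlatMapId u _ (fun s hs => pvExpandItem_nonrec grr _ s (hall s hs))]
        cases F with
        | zero => rfl
        | succ F' => rw [pvWhileA, if_neg hg]

-- per program: A's loop body appends exactly B's chunk, under Pre_'s clause for that program
theorem stepA_eq_chunk (grr : List (String × String)) (final : List String) (p : String)
    (hp : PySem.Str.startswith p "@Recursive(" = true →
      (List.lookup (PySem.Str.strip (pvExtractA p)) grr).isSome = true ∧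
      (PySem.Str.isIn "||" ((List.lookup (PySem.Str.strip (pvExtractA p)) grr).getD "") = true →
        ∀ part ∈ pvSplit ((List.lookup (PySem.Str.strip (pvExtractA p)) grr).getD "") "||",
          (pvDepthI grr (grr.length + 1) part).isSome = true)) :
    pvStepA grr final p = final ++ pvChunkB grr p := by
  have hex : pvExtractB = pvExtractA := rfl
  unfold pvStepA pvChunkB
  rw [hex]
  cases hR : PySem.Str.startswith p "@Recursive(" with
  | false => simp
  | true =>
      obtain ⟨_, hdep⟩ := hp hR
      simp only [Bool.not_true, Bool.false_eq_true, if_false, if_true]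
      cases hin : PySem.Str.isIn "||" ((List.lookup (PySem.Str.strip (pvExtractA p)) grr).getD "") with
      | false => simp
      | true =>
          simp only [Bool.not_true, Bool.false_eq_true, if_false, if_true]
          have hOK : ∀ s ∈ pvSplit ((List.lookup (PySem.Str.strip (pvExtractA p)) grr).getD "") "||",
              pvOK grr (grr.length + 2) s := by
            intro s hs
            obtain ⟨d, hd⟩ := Option.isSome_iff_exists.mp (hdep hin s hs)
            have hdle : d ≤ grr.length + 1 := pvDepthI_le grr _ s d hd
            exact pvOK_mono grr (by omega) s (pvDepthI_ok grr _ s d hd)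
          rw [pvWhileA_eq grr (grr.length + 2) (grr.length + 2) _ hOK (by omega)]

theorem foldl_stepA_eq_flatMap (grr : List (String × String)) (ps : List String)
    (h : ∀ p ∈ ps, PySem.Str.startswith p "@Recursive(" = true →
      (List.lookup (PySem.Str.strip (pvExtractA p)) grr).isSome = true ∧
      (PySem.Str.isIn "||" ((List.lookup (PySem.Str.strip (pvExtractA p)) grr).getD "") = true →
        ∀ part ∈ pvSplit ((List.lookup (PySem.Str.strip (pvExtractA p)) grr).getD "") "||",
          (pvDepthI grr (grr.length + 1) part).isSome = true)) :
    ∀ acc, ps.foldl (pvStepA grr) acc = acc ++ ps.flatMap (pvChunkB grr) := by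
  induction ps with
  | nil => intro acc; simp
  | cons p t ih =>
      intro acc
      rw [List.foldl_cons, stepA_eq_chunk grr acc p (h p (List.mem_cons_self ..)),
          ih (fun q hq => h q (List.mem_cons_of_mem _ hq)) (acc ++ pvChunkB grr p)]
      simp

-- ===== VERDICT (by name: the statement is the Claim_ definition above) =====
theorem get_curr_programs_spec : Claim_equal_get_curr_programs := by
  intro name grr _ hpre
  unfold Spec_get_curr_programs get_curr_programs get_curr_programs_alt
  dsimp only
  rw [foldl_stepA_eq_flatMap grr _ hpre []]
  simp
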